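-- pv_equiv track=rewrite | github.com/BatiDyDx/LCC | prog2/tp-final/src/sopa_letras.py | obtener_columnas
-- ===== SOURCE A (Python) =====
-- def obtener_columnas(sopa):
--     """
--     obtener_columnas: Sopa -> List(Str)
--     Retorna la lista de strings que se forman en las
--     columnas de la sopa
--     Ejemplos:
--     >>> obtener_columna([["a", "b"], ["c", "d"]])
--     ["ac", "bd"]
--     >>> obtener_diagonal([["s", "o", "l"], ["d", "o", "s"], ["l", "a", "s"]])
--     ["sdl", "ooa", "lss"]
--     """
--     columnas = []
--     # Hacemos tantas repeticiones como columnas haya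
--     for i in range(len(sopa)):
--         col = ""
--         # Por cada columna recorremos sobre las filas
--         for j in range(len(sopa)):
--             # Añadimos el caracter al string col
--             col += sopa[j][i]
--         # Añadimos el string que se forma a la lista de columnas
--         columnas.append(col)
--     return columnas
-- ===== SOURCE B (Python) =====
-- def obtener_columnas(sopa):
--     n = len(sopa)
--     columnas = [""] * n
--     for fila in sopa:
--         columnas = [columnas[i] + fila[i] for i in range(n)]
--     return columnas
-- ===== Notes on version B (the rewrite author's own statement) =====
-- stated objective: alternative
-- what changed: Row-major transposition: one pass over the rows maintaining all n column accumulators in parallel, instead of A's column-major nested index loops that rebuild each column string separately.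
import Mathlib
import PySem

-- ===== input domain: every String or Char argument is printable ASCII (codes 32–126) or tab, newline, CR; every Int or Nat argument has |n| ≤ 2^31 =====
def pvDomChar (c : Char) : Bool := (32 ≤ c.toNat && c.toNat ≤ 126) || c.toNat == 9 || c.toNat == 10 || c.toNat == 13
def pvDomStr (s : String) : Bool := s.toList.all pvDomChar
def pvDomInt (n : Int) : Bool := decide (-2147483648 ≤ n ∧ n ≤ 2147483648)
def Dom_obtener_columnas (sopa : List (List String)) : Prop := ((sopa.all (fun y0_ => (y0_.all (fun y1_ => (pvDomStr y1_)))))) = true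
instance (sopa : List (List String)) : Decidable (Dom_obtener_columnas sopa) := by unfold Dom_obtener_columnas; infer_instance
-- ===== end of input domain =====

-- B transposes row-major (one pass over the rows, all column accumulators kept in parallel)
-- instead of A's column-major nested index loops; same cost, different traversal.

-- ===== PORT A =====
-- for i in range(len(sopa)): col = ""; for j in range(len(sopa)): col += sopa[j][i]; columnas.append(col)
-- sopa[j][i] is ported with pyGetD; the "" / [] defaults are the IndexError cases, excluded by Pre_.
def obtener_columnas (sopa : List (List String)) : List String :=
  (PySem.List.pyRange 0 (PySem.List.len sopa)).foldl
    (fun columnas i =>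
      columnas ++
        [(PySem.List.pyRange 0 (PySem.List.len sopa)).foldl
          (fun col j => col ++ PySem.List.pyGetD (PySem.List.pyGetD sopa j []) i "") ""])
    []

-- ===== PORT B =====
-- n = len(sopa); columnas = [""] * n
-- for fila in sopa: columnas = [columnas[i] + fila[i] for i in range(n)]
-- columnas[i] / fila[i] ported with pyGetD; the "" defaults are the IndexError cases, excluded by Pre_.
def obtener_columnas_alt (sopa : List (List String)) : List String :=
  sopa.foldl
    (fun columnas fila =>
      (PySem.List.pyRange 0 (PySem.List.len sopa)).map
        (fun i => PySem.List.pyGetD columnas i "" ++ PySem.List.pyGetD fila i ""))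
    (List.replicate sopa.length "")

-- ===== PRECONDITION & SPEC =====
-- Both Pythons raise IndexError on exactly the ragged inputs (some row shorter than len(sopa)); Pre_ excludes those.
def Pre_obtener_columnas (sopa : List (List String)) : Prop :=
  ∀ fila ∈ sopa, sopa.length ≤ fila.length
instance (sopa : List (List String)) : Decidable (Pre_obtener_columnas sopa) := by
  unfold Pre_obtener_columnas; infer_instance
def pvWitness_obtener_columnas : List (List String) := [["a", "b"], ["c", "d"]]
def Spec_obtener_columnas (sopa : List (List String)) (out : List String) : Prop := out = obtener_columnas_alt sopa
instance (sopa : List (List String)) (out : List String) : Decidable (Spec_obtener_columnas sopa out) := by unfold Spec_obtener_columnas; infer_instance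

-- ===== CLAIM (what is proved, stated in full; the proofs are below) =====
def Claim_equal_obtener_columnas : Prop := ∀ (sopa : List (List String)), Dom_obtener_columnas sopa → Pre_obtener_columnas sopa → Spec_obtener_columnas sopa (obtener_columnas sopa)

-- ===== LEMMAS AND PROOFS =====

-- the string formed by column i, reading the rows top to bottom
def colS (rows : List (List String)) (i : Int) : String :=
  rows.foldl (fun c fila => c ++ PySem.List.pyGetD fila i "") ""

theorem foldl_str_init {α : Type} (g : α → String) (rows : List α) (a : String) :
    rows.foldl (fun c r => c ++ g r) a = a ++ rows.foldl (fun c r => c ++ g r) "" := by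
  induction rows generalizing a with
  | nil => simp
  | cons fila rows ih =>
      simp only [List.foldl_cons]
      rw [ih (a ++ g fila), ih ("" ++ g fila)]
      simp [String.append_assoc]

theorem colS_cons (fila : List String) (rows : List (List String)) (i : Int) :
    colS (fila :: rows) i = PySem.List.pyGetD fila i "" ++ colS rows i := by
  simp only [colS, List.foldl_cons]
  rw [foldl_str_init (fun r => PySem.List.pyGetD r i "")]
  simp

theorem a_eq_map (sopa : List (List String)) :
    obtener_columnas sopa =
      (PySem.List.pyRange 0 (PySem.List.len sopa)).map (colS sopa) := by
  unfold obtener_columnas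
  rw [PySem.List.foldl_append_singleton_eq_map]
  simp only [List.nil_append]
  apply List.map_congr_left
  intro i _
  rw [PySem.List.foldl_pyRange_pyGetD sopa [] (fun col fila => col ++ PySem.List.pyGetD fila i "") "" le_rfl]
  rfl

theorem b_inv (n : Nat) (rows : List (List String)) (f : Int → String) :
    rows.foldl
      (fun columnas fila =>
        (PySem.List.pyRange 0 (n : Int)).map
          (fun i => PySem.List.pyGetD columnas i "" ++ PySem.List.pyGetD fila i ""))
      ((PySem.List.pyRange 0 (n : Int)).map f)
    = (PySem.List.pyRange 0 (n : Int)).map (fun i => f i ++ colS rows i) := by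
  induction rows generalizing f with
  | nil => simp [colS]
  | cons fila rows ih =>
      simp only [List.foldl_cons]
      have hstep :
          (PySem.List.pyRange 0 (n : Int)).map
            (fun i => PySem.List.pyGetD ((PySem.List.pyRange 0 (n : Int)).map f) i ""
                        ++ PySem.List.pyGetD fila i "")
          = (PySem.List.pyRange 0 (n : Int)).map
              (fun i => f i ++ PySem.List.pyGetD fila i "") := by
        apply List.map_congr_left
        intro i hi
        have hmem := PySem.List.mem_pyRange_one.mp hi
        have hk : i = ((i.toNat : Nat) : Int) := by omega
        have hklt : i.toNat < n := by omega
        rw [hk, PySem.List.pyGetD_map_pyRange f n i.toNat "" hklt]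
      rw [hstep, ih (fun i => f i ++ PySem.List.pyGetD fila i "")]
      apply List.map_congr_left
      intro i _
      rw [colS_cons, String.append_assoc]

theorem b_eq_map (sopa : List (List String)) :
    obtener_columnas_alt sopa =
      (PySem.List.pyRange 0 (PySem.List.len sopa)).map (colS sopa) := by
  unfold obtener_columnas_alt
  have hlen : PySem.List.len sopa = ((sopa.length : Nat) : Int) := by
    simp [PySem.List.len]
  rw [hlen]
  have hrep : List.replicate sopa.length "" =
      (PySem.List.pyRange 0 ((sopa.length : Nat) : Int)).map (fun _ => "") := by
    rw [PySem.List.pyRange_zero_natCast]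
    simp [Function.comp_def]
  rw [hrep, b_inv sopa.length sopa (fun _ => "")]
  apply List.map_congr_left
  intro i _
  simp

-- ===== VERDICT (by name: the statement is the Claim_ definition above) =====
theorem obtener_columnas_spec : Claim_equal_obtener_columnas := by
  intro sopa _ _
  show obtener_columnas sopa = obtener_columnas_alt sopa
  rw [a_eq_map, b_eq_map]
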